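-- pv_equiv track=rewrite | github.com/max-stoddard/uk-housing-model-individual-project | src/main/resources/experiments/TotalWealthDistComparison.py | _pick_primary_output
-- ===== SOURCE A (Python) =====
-- def _pick_primary_output(output_files: list[str]) -> str:
--     """Prefer a stable total-wealth measure for comparisons."""
--     preferred = [
--         "NetFinancialWealth-TotalPropertyWealth-Weighted.csv",
--         "GrossFinancialWealth-GrossHousingWealth-Weighted.csv",
--         "NetFinancialWealth-GrossHousingWealth-Weighted.csv",
--     ]
--     for name in preferred:
--         if name in output_files:
--             return name
--     return output_files[0]
-- ===== SOURCE B (Python) =====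
-- def _pick_primary_output(output_files: list[str]) -> str:
--     """Prefer a stable total-wealth measure for comparisons."""
--     preferred = [
--         "NetFinancialWealth-TotalPropertyWealth-Weighted.csv",
--         "GrossFinancialWealth-GrossHousingWealth-Weighted.csv",
--         "NetFinancialWealth-GrossHousingWealth-Weighted.csv",
--     ]
--     ranks = {name: i for i, name in enumerate(preferred)}
--     best = output_files[0]
--     best_rank = ranks.get(best, len(preferred))
--     for name in output_files[1:]:
--         r = ranks.get(name, len(preferred))
--         if r < best_rank:
--             best, best_rank = name, r
--     return best
-- ===== Notes on version B (the rewrite author's own statement) =====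
-- stated objective: alternative
-- what changed: Instead of scanning the preferred list and testing membership in output_files for each name, B builds a rank table once and does a single argmin-by-rank pass over output_files with a strict-< update (ties keep the earliest element).
import Mathlib
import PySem

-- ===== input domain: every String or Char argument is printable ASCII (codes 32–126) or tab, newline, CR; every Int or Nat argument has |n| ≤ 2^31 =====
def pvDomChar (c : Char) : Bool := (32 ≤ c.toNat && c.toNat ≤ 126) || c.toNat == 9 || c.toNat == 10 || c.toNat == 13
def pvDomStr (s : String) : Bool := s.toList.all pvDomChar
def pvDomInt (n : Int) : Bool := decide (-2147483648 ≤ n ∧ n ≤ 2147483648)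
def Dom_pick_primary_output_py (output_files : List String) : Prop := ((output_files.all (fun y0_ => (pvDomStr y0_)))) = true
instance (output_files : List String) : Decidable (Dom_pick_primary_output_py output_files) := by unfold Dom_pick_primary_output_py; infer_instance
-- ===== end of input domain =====

-- B replaces A's scan of the preferred list (with a membership test per name) by one
-- argmin-by-rank pass over output_files using a rank table; alternative decomposition, same cost class.

-- ===== PORT A =====
-- for name in preferred: if name in output_files: return name;  fallthrough: output_files[0]
def pickA_loop (output_files : List String) : List String → String
  | [] => (PySem.List.pyGet? output_files 0).getD ""   -- none = IndexError, excluded by Pre_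
  | n :: rest => if n ∈ output_files then n else pickA_loop output_files rest

def pick_primary_output_py (output_files : List String) : String :=
  pickA_loop output_files
    ["NetFinancialWealth-TotalPropertyWealth-Weighted.csv",
     "GrossFinancialWealth-GrossHousingWealth-Weighted.csv",
     "NetFinancialWealth-GrossHousingWealth-Weighted.csv"]

-- ===== PORT B =====
def pick_primary_output_py_alt (output_files : List String) : String :=
  let preferred : List String :=
    ["NetFinancialWealth-TotalPropertyWealth-Weighted.csv",
     "GrossFinancialWealth-GrossHousingWealth-Weighted.csv",
     "NetFinancialWealth-GrossHousingWealth-Weighted.csv"]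
  let ranks : PySem.Dict String Int :=
    (PySem.List.enumerate preferred 0).foldl (fun d p => d.insert p.2 p.1) PySem.Dict.empty
  match PySem.List.pyGet? output_files 0 with
  | none => ""   -- IndexError, excluded by Pre_
  | some best0 =>
    let st := (PySem.List.slice output_files (some 1) none).foldl
      (fun (st : String × Int) name =>
        let r := ranks.getD name (preferred.length : Int)
        if r < st.2 then (name, r) else st)
      (best0, ranks.getD best0 (preferred.length : Int))
    st.1

-- ===== PRECONDITION & SPEC =====
-- Pre_: A raises IndexError on the empty list (when no preferred name is found); B raises there too.
def Pre_pick_primary_output_py (output_files : List String) : Prop := output_files ≠ []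
instance (output_files : List String) : Decidable (Pre_pick_primary_output_py output_files) := by unfold Pre_pick_primary_output_py; infer_instance
def pvWitness_pick_primary_output_py : List String := ["a.csv"]

def Spec_pick_primary_output_py (output_files : List String) (out : String) : Prop := out = pick_primary_output_py_alt output_files
instance (output_files : List String) (out : String) : Decidable (Spec_pick_primary_output_py output_files out) := by unfold Spec_pick_primary_output_py; infer_instance

-- ===== CLAIM (what is proved, stated in full; the proofs are below) =====
def Claim_equal_pick_primary_output_py : Prop := ∀ (output_files : List String), Dom_pick_primary_output_py output_files → Pre_pick_primary_output_py output_files → Spec_pick_primary_output_py output_files (pick_primary_output_py output_files)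

-- ===== LEMMAS AND PROOFS =====

def pvP0 : String := "NetFinancialWealth-TotalPropertyWealth-Weighted.csv"
def pvP1 : String := "GrossFinancialWealth-GrossHousingWealth-Weighted.csv"
def pvP2 : String := "NetFinancialWealth-GrossHousingWealth-Weighted.csv"

def pvRank (s : String) : Int :=
  if s = pvP0 then 0 else if s = pvP1 then 1 else if s = pvP2 then 2 else 3

lemma pvRanks_getD (s : String) :
    (PySem.Dict.getD
      ((PySem.List.enumerate [pvP0, pvP1, pvP2] 0).foldl
        (fun d p => d.insert p.2 p.1) PySem.Dict.empty) s 3) = pvRank s := by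
  rw [show ((PySem.List.enumerate [pvP0, pvP1, pvP2] 0).foldl
        (fun d p => d.insert p.2 p.1) PySem.Dict.empty)
      = PySem.Dict.mk [(pvP0, (0 : Int)), (pvP1, 1), (pvP2, 2)] from rfl]
  by_cases h0 : s = pvP0
  · subst h0; rfl
  by_cases h1 : s = pvP1
  · subst h1; rfl
  by_cases h2 : s = pvP2
  · subst h2; rfl
  have e0 : (pvP0 == s) = false := beq_eq_false_iff_ne.mpr fun h => h0 h.symm
  have e1 : (pvP1 == s) = false := beq_eq_false_iff_ne.mpr fun h => h1 h.symm
  have e2 : (pvP2 == s) = false := beq_eq_false_iff_ne.mpr fun h => h2 h.symm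
  simp [PySem.Dict.getD, PySem.Dict.get?, List.find?, e0, e1, e2, pvRank, h0, h1, h2]

-- the simple recursion B's fold computes (state snd is always pvRank of state fst)
def pvG (b : String) : List String → String
  | [] => b
  | n :: l => pvG (if pvRank n < pvRank b then n else b) l

lemma pvFoldPure (l : List String) (b : String) :
    ((l.foldl (fun (st : String × Int) name =>
        if pvRank name < st.2 then (name, pvRank name) else st) (b, pvRank b)).1) = pvG b l := by
  induction l generalizing b with
  | nil => rfl
  | cons n l ih =>
    simp only [List.foldl, pvG]
    by_cases h : pvRank n < pvRank b
    · simp only [if_pos h]; exact ih n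
    · simp only [if_neg h]; exact ih b

lemma pvFold_eq_pvG (l : List String) (b : String) :
    ((l.foldl
      (fun (st : String × Int) name =>
        if (PySem.Dict.getD
          ((PySem.List.enumerate [pvP0, pvP1, pvP2] 0).foldl
            (fun d p => d.insert p.2 p.1) PySem.Dict.empty) name 3) < st.2
        then (name, (PySem.Dict.getD
          ((PySem.List.enumerate [pvP0, pvP1, pvP2] 0).foldl
            (fun d p => d.insert p.2 p.1) PySem.Dict.empty) name 3)) else st)
      (b, pvRank b)).1) = pvG b l := by
  simp only [pvRanks_getD]
  exact pvFoldPure l b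

-- what A computes, expressed on (head, tail)
def pvAexpr (b : String) (l : List String) : String :=
  if pvP0 = b ∨ pvP0 ∈ l then pvP0
  else if pvP1 = b ∨ pvP1 ∈ l then pvP1
  else if pvP2 = b ∨ pvP2 ∈ l then pvP2
  else b

lemma pvG_eq_pvAexpr (l : List String) (b : String) : pvG b l = pvAexpr b l := by
  induction l generalizing b with
  | nil =>
    simp only [pvG, pvAexpr, List.not_mem_nil, or_false]
    split_ifs <;> simp_all
  | cons n l ih =>
    simp only [pvG, ih, pvAexpr, List.mem_cons]
    by_cases h0 : n = pvP0 <;> by_cases h1 : n = pvP1 <;> by_cases h2 : n = pvP2 <;>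
      by_cases b0 : b = pvP0 <;> by_cases b1 : b = pvP1 <;> by_cases b2 : b = pvP2 <;>
      simp_all [pvRank, pvP0, pvP1, pvP2] <;> split_ifs <;> simp_all

-- ===== VERDICT (by name: the statement is the Claim_ definition above) =====
theorem pick_primary_output_py_spec : Claim_equal_pick_primary_output_py := by
  intro xs _ hpre
  obtain ⟨x, t, rfl⟩ : ∃ x t, xs = x :: t := by
    cases xs with
    | nil => exact absurd rfl hpre
    | cons x t => exact ⟨x, t, rfl⟩
  show pick_primary_output_py (x :: t) = pick_primary_output_py_alt (x :: t)
  have hB : pick_primary_output_py_alt (x :: t) = pvG x t := by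
    simp only [pick_primary_output_py_alt, PySem.List.pyGet?_zero_cons,
      PySem.List.slice_from_one, List.tail_cons]
    rw [show (["NetFinancialWealth-TotalPropertyWealth-Weighted.csv",
      "GrossFinancialWealth-GrossHousingWealth-Weighted.csv",
      "NetFinancialWealth-GrossHousingWealth-Weighted.csv"] : List String) = [pvP0, pvP1, pvP2]
      from rfl,
      show ((([pvP0, pvP1, pvP2] : List String).length : Int)) = (3 : Int) from rfl,
      pvRanks_getD x]
    exact pvFold_eq_pvG t x
  have hA : pick_primary_output_py (x :: t) = pvAexpr x t := by
    simp only [pick_primary_output_py, pickA_loop, pvAexpr, List.mem_cons,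
      PySem.List.pyGet?_zero_cons, Option.getD_some]
    split_ifs with g0 g1 g2 <;> simp_all [pvP0, pvP1, pvP2, eq_comm]
  rw [hB, pvG_eq_pvAexpr, hA]
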